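-- pv_equiv track=rewrite | github.com/NicholasLea/codi-crac2022_scripts | preprocess.py | get_sentence_map
-- ===== SOURCE A (Python) =====
-- def get_sentence_map(segments, sentence_end):
--     assert len(sentence_end) == sum([len(seg) - 2 for seg in segments])  # of subtokens in all segments
--     sent_map = []
--     sent_idx, subtok_idx = 0, 0
--     for segment in segments:
--         sent_map.append(sent_idx)  # [CLS]
--         for i in range(len(segment) - 2):
--             sent_map.append(sent_idx)
--             sent_idx += int(sentence_end[subtok_idx])
--             subtok_idx += 1
--         sent_map.append(sent_idx)  # [SEP]
--     return sent_map
-- ===== SOURCE B (Python) =====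
-- from itertools import accumulate
--
-- def get_sentence_map(segments, sentence_end):
--     assert len(sentence_end) == sum([len(seg) - 2 for seg in segments])
--     prefix = list(accumulate((int(x) for x in sentence_end), initial=0))
--     sent_map = []
--     offset = 0
--     for segment in segments:
--         n = len(segment) - 2
--         sent_map.append(prefix[offset])              # [CLS]
--         sent_map.extend(prefix[offset + i] for i in range(n))
--         offset += n
--         sent_map.append(prefix[offset])              # [SEP]
--     return sent_map
-- ===== Notes on version B (the rewrite author's own statement) =====
-- stated objective: alternative
-- what changed: Replaces inline accumulation of sent_idx/subtok_idx during the walk with a precomputed prefix-sum table of sentence_end consumed by index with a single running offset.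
import Mathlib
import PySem

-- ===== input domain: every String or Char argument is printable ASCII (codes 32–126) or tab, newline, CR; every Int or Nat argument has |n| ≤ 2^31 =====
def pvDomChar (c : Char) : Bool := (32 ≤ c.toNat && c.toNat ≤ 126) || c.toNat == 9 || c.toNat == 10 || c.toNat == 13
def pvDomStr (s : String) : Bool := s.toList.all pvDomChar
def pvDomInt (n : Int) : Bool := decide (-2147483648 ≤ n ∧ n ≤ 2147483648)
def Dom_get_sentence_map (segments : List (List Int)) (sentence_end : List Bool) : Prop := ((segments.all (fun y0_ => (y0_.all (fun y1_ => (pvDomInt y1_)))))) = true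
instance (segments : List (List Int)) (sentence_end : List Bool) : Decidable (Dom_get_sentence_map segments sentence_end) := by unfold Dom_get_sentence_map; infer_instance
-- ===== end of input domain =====

-- B replaces A's inline accumulation of sent_idx with a precomputed prefix-sum table of
-- sentence_end consumed by index with one running offset (alternative decomposition, same cost).

-- ===== PORT A =====
-- literal port of A's two nested loops; the assert's failure (a raise) is excluded by Pre_ below
def get_sentence_map (segments : List (List Int)) (sentence_end : List Bool) : List Int :=
  (segments.foldl (fun (st : List Int × Int × Int) (segment : List Int) =>
      let st1 : List Int × Int × Int := (st.1 ++ [st.2.1], st.2.1, st.2.2)  -- [CLS]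
      let st2 := (List.range (segment.length - 2)).foldl
        (fun (s : List Int × Int × Int) (_ : Nat) =>
          (s.1 ++ [s.2.1],
           s.2.1 + (if (PySem.List.pyGet? sentence_end s.2.2).getD false then 1 else 0),
           s.2.2 + 1)) st1
      (st2.1 ++ [st2.2.1], st2.2.1, st2.2.2))                               -- [SEP]
    ([], 0, 0)).1

-- ===== PORT B =====
def get_sentence_map_alt (segments : List (List Int)) (sentence_end : List Bool) : List Int :=
  let pfx : List Int := sentence_end.foldl
    (fun P x => P ++ [(PySem.List.pyGet? P (-1)).getD 0 + (if x then 1 else 0)]) [0]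
  (segments.foldl (fun (st : List Int × Int) (segment : List Int) =>
      let n : Int := (segment.length : Int) - 2
      let out1 := st.1 ++ [(PySem.List.pyGet? pfx st.2).getD 0]             -- [CLS]
      let out2 := out1 ++ (PySem.List.pyRange 0 n 1).map
        (fun i => (PySem.List.pyGet? pfx (st.2 + i)).getD 0)
      let o := st.2 + n
      (out2 ++ [(PySem.List.pyGet? pfx o).getD 0], o))                      -- [SEP]
    ([], 0)).1

-- ===== PRECONDITION & SPEC =====
-- Pre_ excludes exactly the inputs on which A raises: AssertionError when len(sentence_end)
-- differs from sum(len(seg)-2), and IndexError when some segment has fewer than 2 tokens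
-- (then the assert can only pass by a short segment offsetting the count, and the subtoken
-- indexing runs past sentence_end).
def Pre_get_sentence_map (segments : List (List Int)) (sentence_end : List Bool) : Prop :=
  (sentence_end.length : Int) = ((segments.map (fun seg => (seg.length : Int) - 2)).sum)
  ∧ ∀ seg ∈ segments, 2 ≤ seg.length
instance (segments : List (List Int)) (sentence_end : List Bool) : Decidable (Pre_get_sentence_map segments sentence_end) := by unfold Pre_get_sentence_map; infer_instance

def pvWitness_get_sentence_map : List (List Int) × List Bool := ([[1, 2, 3], [4, 5]], [true])

def Spec_get_sentence_map (segments : List (List Int)) (sentence_end : List Bool) (out : List Int) : Prop := out = get_sentence_map_alt segments sentence_end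
instance (segments : List (List Int)) (sentence_end : List Bool) (out : List Int) : Decidable (Spec_get_sentence_map segments sentence_end out) := by unfold Spec_get_sentence_map; infer_instance

-- ===== CLAIM (what is proved, stated in full; the proofs are below) =====
def Claim_equal_get_sentence_map : Prop := ∀ (segments : List (List Int)) (sentence_end : List Bool), Dom_get_sentence_map segments sentence_end → Pre_get_sentence_map segments sentence_end → Spec_get_sentence_map segments sentence_end (get_sentence_map segments sentence_end)

-- ===== LEMMAS AND PROOFS =====

-- number of sentence ends among the first k subtokens
def pvCnt (se : List Bool) (k : Nat) : Int := ((se.take k).count true : Int)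

theorem pvCnt_succ (se : List Bool) (j : Nat) (h : j < se.length) :
    pvCnt se (j + 1) = pvCnt se j + (if se[j] then 1 else 0) := by
  simp only [pvCnt, List.take_add_one, List.getElem?_eq_getElem h, Option.toList_some,
    List.count_append]
  cases hb : se[j] <;> simp [hb]

-- the prefix table B builds is the table of pvCnt values
theorem pvPfx_eq (se : List Bool) :
    se.foldl (fun P x => P ++ [(PySem.List.pyGet? P (-1)).getD 0 + (if x then 1 else 0)]) [0]
      = (List.range (se.length + 1)).map (fun k => pvCnt se k) := by
  induction se using List.reverseRecOn with
  | nil => simp [pvCnt]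
  | append_singleton init b ih =>
    rw [List.foldl_append, ih]
    simp only [List.foldl_cons, List.foldl_nil]
    have hlast : (PySem.List.pyGet? ((List.range (init.length + 1)).map (fun k => pvCnt init k)) (-1)).getD 0
        = pvCnt init init.length := by
      rw [List.range_succ, List.map_append]
      simp [PySem.List.pyGet?_neg_one_append_singleton]
    have hcnt : ∀ k ≤ init.length, pvCnt (init ++ [b]) k = pvCnt init k := by
      intro k hk
      simp [pvCnt, List.take_append_of_le_length hk]
    have hcnt' : pvCnt (init ++ [b]) (init.length + 1)
        = pvCnt init init.length + (if b then 1 else 0) := by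
      have h1 : (init ++ [b]).take (init.length + 1) = init ++ [b] :=
        List.take_of_length_le (by simp)
      have h2 : init.take init.length = init := List.take_length
      rw [pvCnt, pvCnt, h1, h2, List.count_append]
      cases b <;> simp
    rw [hlast]
    have hlen2 : (init ++ [b]).length + 1 = (init.length + 1) + 1 := by simp
    rw [hlen2]
    conv_rhs => rw [List.range_succ, List.map_append]
    congr 1
    · apply List.map_congr_left
      intro k hk
      exact (hcnt k (Nat.le_of_lt_succ (List.mem_range.mp hk))).symm
    · simp [hcnt']

theorem pvPfx_get (se : List Bool) (k : Nat) (hk : k ≤ se.length) :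
    (PySem.List.pyGet? (se.foldl (fun P x => P ++ [(PySem.List.pyGet? P (-1)).getD 0 + (if x then 1 else 0)]) [0]) ((k : Nat) : Int)).getD 0
      = pvCnt se k := by
  rw [pvPfx_eq]
  rw [PySem.List.pyGet?_natCast]
  rw [List.getElem?_map]
  simp [List.getElem?_range (by omega : k < se.length + 1)]

-- A's inner loop characterised
theorem pvInner (se : List Bool) (k o : Nat) (m : List Int) (h : o + k ≤ se.length) :
    (List.range k).foldl
      (fun (s : List Int × Int × Int) (_ : Nat) =>
        (s.1 ++ [s.2.1],
         s.2.1 + (if (PySem.List.pyGet? se s.2.2).getD false then 1 else 0),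
         s.2.2 + 1)) (m, pvCnt se o, ((o : Nat) : Int))
    = (m ++ (List.range k).map (fun i => pvCnt se (o + i)), pvCnt se (o + k), ((o + k : Nat) : Int)) := by
  induction k generalizing m with
  | zero => simp
  | succ k ih =>
    rw [List.range_succ, List.foldl_append, ih m (by omega)]
    have hidx : o + k < se.length := by omega
    have hse : (PySem.List.pyGet? se (((o + k : Nat) : Int))).getD false = se[o + k] := by
      rw [PySem.List.pyGet?_natCast]
      simp [List.getElem?_eq_getElem hidx]
    simp only [List.foldl_cons, List.foldl_nil, hse, Prod.mk.injEq]
    refine ⟨?_, ?_, ?_⟩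
    · simp
    · rw [show o + (k + 1) = (o + k) + 1 from rfl, pvCnt_succ se (o + k) hidx]
    · push_cast; ring

-- main induction over segments
theorem pvMain (se : List Bool) (segs : List (List Int)) (m : List Int) (o : Nat)
    (hb : o + ((segs.map (fun s => s.length - 2)).sum) ≤ se.length)
    (hlen : ∀ s ∈ segs, 2 ≤ s.length) :
    (segs.foldl (fun (st : List Int × Int × Int) (segment : List Int) =>
        let st1 : List Int × Int × Int := (st.1 ++ [st.2.1], st.2.1, st.2.2)
        let st2 := (List.range (segment.length - 2)).foldl
          (fun (s : List Int × Int × Int) (_ : Nat) =>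
            (s.1 ++ [s.2.1],
             s.2.1 + (if (PySem.List.pyGet? se s.2.2).getD false then 1 else 0),
             s.2.2 + 1)) st1
        (st2.1 ++ [st2.2.1], st2.2.1, st2.2.2)) (m, pvCnt se o, ((o : Nat) : Int))).1
    = (segs.foldl (fun (st : List Int × Int) (segment : List Int) =>
        let n : Int := (segment.length : Int) - 2
        let out1 := st.1 ++ [(PySem.List.pyGet? (se.foldl (fun P x => P ++ [(PySem.List.pyGet? P (-1)).getD 0 + (if x then 1 else 0)]) [0]) st.2).getD 0]
        let out2 := out1 ++ (PySem.List.pyRange 0 n 1).map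
          (fun i => (PySem.List.pyGet? (se.foldl (fun P x => P ++ [(PySem.List.pyGet? P (-1)).getD 0 + (if x then 1 else 0)]) [0]) (st.2 + i)).getD 0)
        let o := st.2 + n
        (out2 ++ [(PySem.List.pyGet? (se.foldl (fun P x => P ++ [(PySem.List.pyGet? P (-1)).getD 0 + (if x then 1 else 0)]) [0]) o).getD 0], o))
      (m, ((o : Nat) : Int))).1 := by
  induction segs generalizing m o with
  | nil => simp
  | cons seg rest ih =>
    have h2 : 2 ≤ seg.length := hlen seg (by simp)
    have hk : o + (seg.length - 2) ≤ se.length := by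
      simp [List.map_cons, List.sum_cons] at hb; omega
    set k := seg.length - 2 with hkdef
    have hn : ((seg.length : Int) - 2) = ((k : Nat) : Int) := by omega
    simp only [List.foldl_cons]
    rw [pvInner se k o (m ++ [pvCnt se o]) hk]
    have hrange : (PySem.List.pyRange 0 ((seg.length : Int) - 2) 1).map
        (fun i => (PySem.List.pyGet? (se.foldl (fun P x => P ++ [(PySem.List.pyGet? P (-1)).getD 0 + (if x then 1 else 0)]) [0]) (((o : Nat) : Int) + i)).getD 0)
        = (List.range k).map (fun i => pvCnt se (o + i)) := by
      rw [hn, PySem.List.pyRange_one]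
      simp only [Int.sub_zero, Int.toNat_natCast, List.map_map]
      apply List.map_congr_left
      intro i hi
      have hi' : i < k := List.mem_range.mp hi
      have : ((o : Nat) : Int) + (0 + (i : Nat)) = (((o + i : Nat)) : Int) := by push_cast; ring
      simp only [Function.comp_apply, this]
      exact pvPfx_get se (o + i) (by omega)
    have hP0 := pvPfx_get se o (by omega)
    have hPk := pvPfx_get se (o + k) hk
    have hoff : ((o : Nat) : Int) + ((seg.length : Int) - 2) = (((o + k : Nat)) : Int) := by
      rw [hn]; push_cast; ring
    simp only [hrange, hP0, hoff, hPk]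
    have := ih (m ++ [pvCnt se o] ++ (List.range k).map (fun i => pvCnt se (o + i)) ++ [pvCnt se (o + k)]) (o + k)
      (by simp [List.map_cons, List.sum_cons] at hb; omega)
      (fun s hs => hlen s (by simp [hs]))
    simpa using this

theorem pvSum (segs : List (List Int)) (h : ∀ s ∈ segs, 2 ≤ s.length) :
    (((segs.map (fun s => s.length - 2)).sum : Nat) : Int)
      = (segs.map (fun seg => (seg.length : Int) - 2)).sum := by
  induction segs with
  | nil => simp
  | cons a t iht =>
    have h2 : 2 ≤ a.length := h a (by simp)
    have ht := iht (fun s hs => h s (by simp [hs]))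
    simp only [List.map_cons, List.sum_cons, Nat.cast_add]
    omega

-- ===== VERDICT (by name: the statement is the Claim_ definition above) =====
theorem get_sentence_map_spec : Claim_equal_get_sentence_map := by
  intro segments sentence_end _ hpre
  obtain ⟨hsum, hlen⟩ := hpre
  unfold Spec_get_sentence_map get_sentence_map get_sentence_map_alt
  have hcast := pvSum segments hlen
  have hb : 0 + ((segments.map (fun s => s.length - 2)).sum) ≤ sentence_end.length := by omega
  have := pvMain sentence_end segments [] 0 hb hlen
  simpa [pvCnt] using this
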